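-- pv_equiv track=rewrite | github.com/Corticomics/rodRefReg | Project/main.py | create_relay_pairs
-- ===== SOURCE A (Python) =====
-- def create_relay_pairs(num_hats):
--     relay_units = []
--     for hat in range(num_hats):
--         start_relay = hat * 16 + 1
--         for i in range(0, 16, 2):
--             relay_pair = (start_relay + i, start_relay + i + 1)
--             relay_units.append(relay_pair)
--     return relay_units
-- ===== SOURCE B (Python) =====
-- def create_relay_pairs(num_hats):
--     return [(2 * k + 1, 2 * k + 2) for k in range(8 * num_hats)]
-- ===== Notes on version B (the rewrite author's own statement) =====
-- stated objective: simpler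
-- what changed: Replaces the two-level per-hat loop with base-offset arithmetic by a single comprehension over range(8*num_hats) using the closed form (2k+1, 2k+2) for the k-th pair.
import Mathlib
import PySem

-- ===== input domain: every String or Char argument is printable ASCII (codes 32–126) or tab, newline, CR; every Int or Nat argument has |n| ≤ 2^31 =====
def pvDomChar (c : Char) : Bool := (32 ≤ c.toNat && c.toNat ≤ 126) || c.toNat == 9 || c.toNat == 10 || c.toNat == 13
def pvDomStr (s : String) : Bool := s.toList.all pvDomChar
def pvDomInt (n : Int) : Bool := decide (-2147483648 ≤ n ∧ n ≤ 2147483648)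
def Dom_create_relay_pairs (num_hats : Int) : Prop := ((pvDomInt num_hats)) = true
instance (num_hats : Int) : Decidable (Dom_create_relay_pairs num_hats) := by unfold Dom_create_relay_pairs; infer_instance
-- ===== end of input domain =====

-- B replaces A's nested per-hat loop (base + even offsets) by one flat map over
-- range(8*num_hats) with the closed form (2k+1, 2k+2); objective: simpler.

-- ===== PORT A =====
def create_relay_pairs (num_hats : Int) : List (Int × Int) :=
  (PySem.List.pyRange 0 num_hats 1).foldl (fun relay_units hat =>
    let start_relay := hat * 16 + 1
    (PySem.List.pyRange 0 16 2).foldl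
      (fun acc i => acc ++ [(start_relay + i, start_relay + i + 1)]) relay_units) []

-- ===== PORT B =====
def create_relay_pairs_alt (num_hats : Int) : List (Int × Int) :=
  (PySem.List.pyRange 0 (8 * num_hats) 1).map (fun k => (2 * k + 1, 2 * k + 2))

-- ===== PRECONDITION & SPEC =====
def Spec_create_relay_pairs (num_hats : Int) (out : List (Int × Int)) : Prop := out = create_relay_pairs_alt num_hats
instance (num_hats : Int) (out : List (Int × Int)) : Decidable (Spec_create_relay_pairs num_hats out) := by unfold Spec_create_relay_pairs; infer_instance

-- ===== CLAIM (what is proved, stated in full; the proofs are below) =====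
def Claim_equal_create_relay_pairs : Prop := ∀ (num_hats : Int), Dom_create_relay_pairs num_hats → Spec_create_relay_pairs num_hats (create_relay_pairs num_hats)

-- ===== LEMMAS AND PROOFS =====

-- A's per-hat block, after rewriting both foldls into map/flatMap form.
def pvBlock (hat : Int) : List (Int × Int) :=
  (PySem.List.pyRange 0 16 2).map (fun i => (hat * 16 + 1 + i, hat * 16 + 1 + i + 1))

theorem create_relay_pairs_eq_flatMap (n : Int) :
    create_relay_pairs n = (PySem.List.pyRange 0 n 1).flatMap pvBlock := by
  unfold create_relay_pairs
  have h : ∀ (l : List Int) (acc : List (Int × Int)),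
      l.foldl (fun relay_units hat =>
        let start_relay := hat * 16 + 1
        (PySem.List.pyRange 0 16 2).foldl
          (fun acc i => acc ++ [(start_relay + i, start_relay + i + 1)]) relay_units) acc
      = l.foldl (fun acc hat => acc ++ pvBlock hat) acc := by
    intro l
    induction l with
    | nil => intro acc; rfl
    | cons x xs ih =>
      intro acc
      simp only [List.foldl_cons, ih]
      rw [PySem.List.foldl_append_singleton_eq_map]
      rfl
  rw [h, PySem.List.foldl_append_eq_flatMap]
  simp

theorem pyRange_eight (a : Int) :
    PySem.List.pyRange a (a + 8) 1 = [a, a+1, a+2, a+3, a+4, a+5, a+6, a+7] := by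
  rw [PySem.List.pyRange_one_cons (by omega), PySem.List.pyRange_one_cons (by omega),
      PySem.List.pyRange_one_cons (by omega), PySem.List.pyRange_one_cons (by omega),
      PySem.List.pyRange_one_cons (by omega), PySem.List.pyRange_one_cons (by omega),
      PySem.List.pyRange_one_cons (by omega), PySem.List.pyRange_one_cons (by omega),
      PySem.List.pyRange_one_eq_nil (by omega)]
  norm_num
  refine ⟨by ring, by ring, by ring, by ring, by ring, by ring⟩

theorem main_nat (m : Nat) :
    create_relay_pairs_alt (m : Int) = (PySem.List.pyRange 0 (m : Int) 1).flatMap pvBlock := by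
  induction m with
  | zero => rfl
  | succ k ih =>
    unfold create_relay_pairs_alt at *
    have h1 : ((k + 1 : Nat) : Int) = (k : Int) + 1 := by push_cast; ring
    have h2 : (8 : Int) * ((k : Int) + 1) = 8 * (k : Int) + 8 := by ring
    rw [h1, h2, PySem.List.pyRange_one_succ_right (by positivity),
        PySem.List.pyRange_one_append 0 (8 * (k : Int)) (8 * (k : Int) + 8) (by positivity) (by omega),
        List.map_append, List.flatMap_append, ← ih, pyRange_eight (8 * (k : Int))]
    congr 1
    simp [pvBlock, PySem.List.pyRange, List.range_succ]
    ring_nf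
    simp

-- ===== VERDICT (by name: the statement is the Claim_ definition above) =====
theorem create_relay_pairs_spec : Claim_equal_create_relay_pairs := by
  intro n _
  show create_relay_pairs n = create_relay_pairs_alt n
  by_cases h : n ≤ 0
  · rw [create_relay_pairs_eq_flatMap, PySem.List.pyRange_one_eq_nil (by omega)]
    unfold create_relay_pairs_alt
    rw [PySem.List.pyRange_one_eq_nil (by omega)]
    rfl
  · push Not at h
    obtain ⟨m, rfl⟩ : ∃ m : Nat, n = (m : Int) := ⟨n.toNat, by omega⟩
    rw [create_relay_pairs_eq_flatMap, main_nat]
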